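-- pv_equiv track=rewrite | github.com/wylu/leetcodecn | src/python/p1000to1099/1001.网格照明.py | gridIllumination
-- ===== SOURCE A (Python) =====
-- from collections import defaultdict
-- from typing import List
--
-- def gridIllumination(n: int, lamps: List[List[int]],
--                      queries: List[List[int]]) -> List[int]:
--     lights = set()
--     rows, cols = defaultdict(int), defaultdict(int)
--     dales, hills = defaultdict(int), defaultdict(int)
--
--     for x, y in lamps:
--         if (x * n + y) not in lights:
--             lights.add(x * n + y)
--             rows[x] += 1
--             cols[y] += 1
--             dales[x - y] += 1
--             hills[x + y] += 1
--
--     ans = []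
--     for x, y in queries:
--         lighten = bool(rows[x] or cols[y] or dales[x - y] or hills[x + y])
--         ans.append(int(lighten))
--
--         for i in range(x - 1, x + 2):
--             for j in range(y - 1, y + 2):
--                 if 0 <= i < n and 0 <= j < n and (i * n + j) in lights:
--                     lights.discard(i * n + j)
--                     rows[i] -= 1
--                     cols[j] -= 1
--                     dales[i - j] -= 1
--                     hills[i + j] -= 1
--
--     return ans
-- ===== SOURCE B (Python) =====
-- from typing import List
--
-- def gridIllumination(n: int, lamps: List[List[int]],
--                      queries: List[List[int]]) -> List[int]:
--     on = {(x, y) for x, y in lamps}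
--     ans = []
--     for x, y in queries:
--         lit = any(lx == x or ly == y or lx - ly == x - y or lx + ly == x + y
--                   for lx, ly in on)
--         ans.append(int(lit))
--         for i in range(x - 1, x + 2):
--             for j in range(y - 1, y + 2):
--                 if 0 <= i < n and 0 <= j < n:
--                     on.discard((i, j))
--     return ans
-- ===== Notes on version B (the rewrite author's own statement) =====
-- stated objective: simpler
-- what changed: A maintains a cell-id set plus four incrementally updated counter dicts (rows/cols/diagonals); B keeps only a set of lamp coordinate pairs, scans it on each query for a row/column/diagonal hit, and discards turned-off neighbors from it. …
-- outside the precondition, e.g. on gridIllumination(2, [[0, 5], [2, 1]], [[2, 0]]): A returns [0], B returns [1]; on gridIllumination(3, [[0, 4]], [[1, 1], [1, 2]]): A returns [0, 1], B returns [0, 0]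
import Mathlib
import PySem

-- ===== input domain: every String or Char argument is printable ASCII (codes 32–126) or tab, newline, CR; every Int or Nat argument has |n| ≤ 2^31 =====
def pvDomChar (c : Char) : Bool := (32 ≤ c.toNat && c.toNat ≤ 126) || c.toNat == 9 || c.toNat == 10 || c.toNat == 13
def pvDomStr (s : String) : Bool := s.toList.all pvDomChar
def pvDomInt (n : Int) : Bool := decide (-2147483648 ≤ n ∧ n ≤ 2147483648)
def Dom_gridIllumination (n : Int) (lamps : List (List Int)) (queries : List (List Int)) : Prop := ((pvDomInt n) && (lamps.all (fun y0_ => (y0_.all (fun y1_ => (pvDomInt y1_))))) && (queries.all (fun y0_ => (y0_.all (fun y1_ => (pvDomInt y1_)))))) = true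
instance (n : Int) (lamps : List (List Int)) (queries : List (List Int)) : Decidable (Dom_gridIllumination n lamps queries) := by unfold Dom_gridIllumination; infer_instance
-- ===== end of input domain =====

-- B drops A's four counter dicts and keeps only a set of lamp coordinates that it
-- rescans on every query (simpler bookkeeping, not faster).

-- ===== PORT A =====
-- Port of A: lamp set of cell ids plus four incrementally-maintained counter dicts.
structure PvStA where
  lights : PySem.Set Int
  rows : PySem.Dict Int Int
  cols : PySem.Dict Int Int
  dales : PySem.Dict Int Int
  hills : PySem.Dict Int Int

def pvAddLamp (n : Int) (st : PvStA) (l : List Int) : PvStA :=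
  match l with
  | [x, y] =>
    if PySem.Set.contains st.lights (x * n + y) then st
    else
      { lights := PySem.Set.add st.lights (x * n + y),
        rows := st.rows.insert x (st.rows.getD x 0 + 1),
        cols := st.cols.insert y (st.cols.getD y 0 + 1),
        dales := st.dales.insert (x - y) (st.dales.getD (x - y) 0 + 1),
        hills := st.hills.insert (x + y) (st.hills.getD (x + y) 0 + 1) }
  | _ => st

def pvDiscard (n : Int) (st : PvStA) (i j : Int) : PvStA :=
  if 0 ≤ i ∧ i < n ∧ 0 ≤ j ∧ j < n ∧ PySem.Set.contains st.lights (i * n + j) then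
    { lights := PySem.Set.discard st.lights (i * n + j),
      rows := st.rows.insert i (st.rows.getD i 0 - 1),
      cols := st.cols.insert j (st.cols.getD j 0 - 1),
      dales := st.dales.insert (i - j) (st.dales.getD (i - j) 0 - 1),
      hills := st.hills.insert (i + j) (st.hills.getD (i + j) 0 - 1) }
  else st

def pvQueriesA (n : Int) : PvStA → List (List Int) → List Int
  | _, [] => []
  | st, q :: rest =>
    match q with
    | [x, y] =>
      let lit : Int :=
        if st.rows.getD x 0 ≠ 0 ∨ st.cols.getD y 0 ≠ 0 ∨
           st.dales.getD (x - y) 0 ≠ 0 ∨ st.hills.getD (x + y) 0 ≠ 0 then 1 else 0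
      let st' := (PySem.List.pyRange (x - 1) (x + 2) 1).foldl
        (fun s i => (PySem.List.pyRange (y - 1) (y + 2) 1).foldl
          (fun s2 j => pvDiscard n s2 i j) s) st
      lit :: pvQueriesA n st' rest
    | _ => pvQueriesA n st rest

def gridIllumination (n : Int) (lamps : List (List Int)) (queries : List (List Int)) : List Int :=
  pvQueriesA n
    (lamps.foldl (pvAddLamp n)
      { lights := PySem.Set.empty, rows := PySem.Dict.empty, cols := PySem.Dict.empty,
        dales := PySem.Dict.empty, hills := PySem.Dict.empty })
    queries

-- ===== PORT B =====
-- Port of B: a set of lamp coordinate pairs, rescanned on every query.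
def pvOnSet (lamps : List (List Int)) : PySem.Set (Int × Int) :=
  lamps.foldl
    (fun s l => match l with
      | [x, y] => PySem.Set.add s (x, y)
      | _ => s)
    PySem.Set.empty

def pvHit (s : PySem.Set (Int × Int)) (x y : Int) : Bool :=
  s.any (fun c => c.1 == x || c.2 == y || c.1 - c.2 == x - y || c.1 + c.2 == x + y)

def pvTurnOff (n : Int) (s : PySem.Set (Int × Int)) (i j : Int) : PySem.Set (Int × Int) :=
  if 0 ≤ i ∧ i < n ∧ 0 ≤ j ∧ j < n then PySem.Set.discard s (i, j) else s

def pvQueriesB (n : Int) : PySem.Set (Int × Int) → List (List Int) → List Int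
  | _, [] => []
  | s, q :: rest =>
    match q with
    | [x, y] =>
      let lit : Int := if pvHit s x y then 1 else 0
      let s' := (PySem.List.pyRange (x - 1) (x + 2) 1).foldl
        (fun t i => (PySem.List.pyRange (y - 1) (y + 2) 1).foldl
          (fun t2 j => pvTurnOff n t2 i j) t) s
      lit :: pvQueriesB n s' rest
    | _ => pvQueriesB n s rest

def gridIllumination_alt (n : Int) (lamps : List (List Int)) (queries : List (List Int)) : List Int :=
  pvQueriesB n (pvOnSet lamps) queries

-- ===== PRECONDITION & SPEC =====
-- Pre_ excludes rows of length ≠ 2 (the tuple unpacking 'for x, y in …' raises ValueError), and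
-- inputs where two lamps at different coordinates share a cell id x*n+y, or an out-of-grid lamp's
-- cell id equals that of an in-grid cell adjacent to a query: lamps outside the n×n grid are outside
-- the problem's stated domain, and on such id collisions identifying lamps by cell id (A) and by
-- coordinates (B) are equally defensible readings that give different values.
def Pre_gridIllumination (n : Int) (lamps : List (List Int)) (queries : List (List Int)) : Prop :=
  (∀ l ∈ lamps, l.length = 2) ∧ (∀ q ∈ queries, q.length = 2) ∧
  (∀ l1 ∈ lamps, ∀ l2 ∈ lamps,
     l1.getD 0 0 * n + l1.getD 1 0 = l2.getD 0 0 * n + l2.getD 1 0 → l1 = l2) ∧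
  (∀ l ∈ lamps,
     (0 ≤ l.getD 0 0 ∧ l.getD 0 0 < n ∧ 0 ≤ l.getD 1 0 ∧ l.getD 1 0 < n) ∨
     (∀ q ∈ queries, ∀ i ∈ PySem.List.pyRange (q.getD 0 0 - 1) (q.getD 0 0 + 2) 1,
        ∀ j ∈ PySem.List.pyRange (q.getD 1 0 - 1) (q.getD 1 0 + 2) 1,
        0 ≤ i → i < n → 0 ≤ j → j < n → l.getD 0 0 * n + l.getD 1 0 ≠ i * n + j))
instance (n : Int) (lamps : List (List Int)) (queries : List (List Int)) : Decidable (Pre_gridIllumination n lamps queries) := by unfold Pre_gridIllumination; infer_instance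

def pvWitness_gridIllumination : Int × List (List Int) × List (List Int) :=
  (5, [[0, 0], [4, 4]], [[1, 1], [1, 0]])

def Spec_gridIllumination (n : Int) (lamps : List (List Int)) (queries : List (List Int)) (out : List Int) : Prop := out = gridIllumination_alt n lamps queries
instance (n : Int) (lamps : List (List Int)) (queries : List (List Int)) (out : List Int) : Decidable (Spec_gridIllumination n lamps queries out) := by unfold Spec_gridIllumination; infer_instance

-- ===== CLAIM =====
def Claim_equal_gridIllumination : Prop := ∀ (n : Int) (lamps : List (List Int)) (queries : List (List Int)), Dom_gridIllumination n lamps queries → Pre_gridIllumination n lamps queries → Spec_gridIllumination n lamps queries (gridIllumination n lamps queries)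

-- ===== LEMMAS AND PROOFS =====

-- The no-collision facts Pre_ provides, in the form the induction threads along.
def PvInj (n : Int) (L : List (List Int)) : Prop :=
  ∀ l1 ∈ L, ∀ l2 ∈ L, l1.getD 0 0 * n + l1.getD 1 0 = l2.getD 0 0 * n + l2.getD 1 0 → l1 = l2

def PvSafe (n : Int) (L : List (List Int)) (qs0 : List (List Int)) : Prop :=
  ∀ l ∈ L,
    (0 ≤ l.getD 0 0 ∧ l.getD 0 0 < n ∧ 0 ≤ l.getD 1 0 ∧ l.getD 1 0 < n) ∨
    (∀ q ∈ qs0, ∀ i ∈ PySem.List.pyRange (q.getD 0 0 - 1) (q.getD 0 0 + 2) 1,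
       ∀ j ∈ PySem.List.pyRange (q.getD 1 0 - 1) (q.getD 1 0 + 2) 1,
       0 ≤ i → i < n → 0 ≤ j → j < n → l.getD 0 0 * n + l.getD 1 0 ≠ i * n + j)

-- The coupling invariant between A's state and B's coordinate set.
def PvInv (n : Int) (L : List (List Int)) (stA : PvStA) (s : PySem.Set (Int × Int)) : Prop :=
  s.Nodup ∧
  (∀ c ∈ s, [c.1, c.2] ∈ L) ∧
  (∀ id : Int, id ∈ stA.lights ↔ ∃ c ∈ s, id = c.1 * n + c.2) ∧
  (∀ k : Int, stA.rows.getD k 0 = (s.countP (fun c => c.1 == k) : Int)) ∧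
  (∀ k : Int, stA.cols.getD k 0 = (s.countP (fun c => c.2 == k) : Int)) ∧
  (∀ k : Int, stA.dales.getD k 0 = (s.countP (fun c => c.1 - c.2 == k) : Int)) ∧
  (∀ k : Int, stA.hills.getD k 0 = (s.countP (fun c => c.1 + c.2 == k) : Int))

-- The cell id x*n+y is injective on in-grid coordinates.
theorem pv_id_inj (n a1 b1 a2 b2 : Int) (hb1 : 0 ≤ b1 ∧ b1 < n) (hb2 : 0 ≤ b2 ∧ b2 < n)
    (h : a1 * n + b1 = a2 * n + b2) : a1 = a2 ∧ b1 = b2 := by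
  have hn : 0 < n := by omega
  rcases lt_trichotomy a1 a2 with hlt | heq | hgt
  · exfalso
    nlinarith [mul_le_mul_of_nonneg_right (by omega : (1 : Int) ≤ a2 - a1) (le_of_lt hn)]
  · exact ⟨heq, by subst heq; omega⟩
  · exfalso
    nlinarith [mul_le_mul_of_nonneg_right (by omega : (1 : Int) ≤ a1 - a2) (le_of_lt hn)]

-- Two lamp coordinates in s with equal cell ids are equal.
theorem pv_s_inj (n : Int) (L : List (List Int)) (hinj : PvInj n L)
    (s : PySem.Set (Int × Int)) (hsub : ∀ c ∈ s, [c.1, c.2] ∈ L)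
    (c1 : Int × Int) (hc1 : c1 ∈ s) (c2 : Int × Int) (hc2 : c2 ∈ s)
    (he : c1.1 * n + c1.2 = c2.1 * n + c2.2) : c1 = c2 := by
  have := hinj [c1.1, c1.2] (hsub c1 hc1) [c2.1, c2.2] (hsub c2 hc2) (by simpa using he)
  simp only [List.cons.injEq, and_true] at this
  exact Prod.ext this.1 this.2

theorem pv_discard_of_not_mem (s : PySem.Set (Int × Int)) (x : Int × Int) (hx : x ∉ s) :
    PySem.Set.discard s x = s := by
  apply List.filter_eq_self.mpr
  intro y hy
  have hne : y ≠ x := fun e => hx (e ▸ hy)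
  simpa using hne

theorem pv_countP_discard (s : PySem.Set (Int × Int)) (x : Int × Int) (hnd : s.Nodup)
    (hx : x ∈ s) (p : Int × Int → Bool) :
    ((PySem.Set.discard s x).countP p : Int) = (s.countP p : Int) - (if p x then 1 else 0) := by
  have he : PySem.Set.discard s x = s.erase x := by
    rw [List.Nodup.erase_eq_filter hnd]
    rfl
  have hperm : s.Perm (x :: s.erase x) := List.perm_cons_erase hx
  have := hperm.countP_eq p
  rw [he, this, List.countP_cons]
  by_cases hpx : p x = true <;> simp [hpx]

-- One counter of A against B's scan count: recording one more lamp.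
theorem pv_cnt_insert (key : Int × Int → Int) (d : PySem.Dict Int Int)
    (s : List (Int × Int)) (w : Int × Int)
    (h : ∀ k : Int, d.getD k 0 = (s.countP (fun c => key c == k) : Int)) (k : Int) :
    (d.insert (key w) (d.getD (key w) 0 + 1)).getD k 0 =
      ((s ++ [w]).countP (fun c => key c == k) : Int) := by
  rw [PySem.Dict.getD_insert]
  simp only [List.countP_append, List.countP_cons, List.countP_nil]
  by_cases hk : k = key w
  · subst hk
    rw [if_pos rfl, h]
    simp only [beq_self_eq_true, if_true]
    push_cast
    ring
  · rw [if_neg hk, h k]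
    have hne : (key w == k) = false := by simp [Ne.symm hk]
    simp [hne]

-- … and turning one lamp off.
theorem pv_cnt_discard (key : Int × Int → Int) (d : PySem.Dict Int Int)
    (s : PySem.Set (Int × Int)) (w : Int × Int) (hnd : s.Nodup) (hw : w ∈ s)
    (h : ∀ k : Int, d.getD k 0 = (s.countP (fun c => key c == k) : Int)) (k : Int) :
    (d.insert (key w) (d.getD (key w) 0 - 1)).getD k 0 =
      ((PySem.Set.discard s w).countP (fun c => key c == k) : Int) := by
  rw [PySem.Dict.getD_insert,
    pv_countP_discard s w hnd hw (fun c => key c == k)]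
  by_cases hk : k = key w
  · subst hk
    rw [if_pos rfl, h]
    simp
  · rw [if_neg hk, h k]
    have hne : (key w == k) = false := by simp [Ne.symm hk]
    simp [hne]

theorem pvInv_empty (n : Int) (L : List (List Int)) : PvInv n L
    { lights := PySem.Set.empty, rows := PySem.Dict.empty, cols := PySem.Dict.empty,
      dales := PySem.Dict.empty, hills := PySem.Dict.empty } PySem.Set.empty := by
  refine ⟨List.nodup_nil, by simp [PySem.Set.empty], ?_, ?_, ?_, ?_, ?_⟩ <;> intro k <;>
    simp [PySem.Set.empty, PySem.Dict.getD_empty]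

theorem pvInv_add (n : Int) (L : List (List Int)) (hinj : PvInj n L)
    (stA : PvStA) (s : PySem.Set (Int × Int)) (x y : Int)
    (hxy : [x, y] ∈ L) (h : PvInv n L stA s) :
    PvInv n L (pvAddLamp n stA [x, y]) (PySem.Set.add s (x, y)) := by
  obtain ⟨hnd, hsub, hmem, h2, h3, h4, h5⟩ := h
  have hiff : (x * n + y) ∈ stA.lights ↔ (x, y) ∈ s := by
    rw [hmem]
    constructor
    · rintro ⟨c, hc, he⟩
      have := pv_s_inj n L hinj (s ++ [(x, y)])
        (by
          intro c' hc'
          rcases List.mem_append.mp hc' with hc' | hc'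
          · exact hsub c' hc'
          · simp at hc'; subst hc'; exact hxy)
        c (List.mem_append.mpr (Or.inl hc)) (x, y) (List.mem_append.mpr (Or.inr (by simp)))
        he.symm
      exact this ▸ hc
    · intro hc
      exact ⟨(x, y), hc, rfl⟩
  simp only [pvAddLamp]
  by_cases hin : (x, y) ∈ s
  · have hc : PySem.Set.contains stA.lights (x * n + y) = true := by
      simpa [PySem.Set.contains_iff] using hiff.mpr hin
    rw [hc, if_pos rfl, PySem.Set.add_of_mem hin]
    exact ⟨hnd, hsub, hmem, h2, h3, h4, h5⟩
  · have hc : PySem.Set.contains stA.lights (x * n + y) = false := by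
      simpa [PySem.Set.contains_iff] using fun hm => hin (hiff.mp hm)
    rw [hc, PySem.Set.add_of_not_mem hin]
    simp only [Bool.false_eq_true, if_false]
    refine ⟨?_, ?_, ?_, ?_, ?_, ?_, ?_⟩
    · refine List.Nodup.append hnd (List.nodup_singleton _) ?_
      intro a ha hb
      simp only [List.mem_singleton] at hb
      exact hin (hb ▸ ha)
    · intro c hc'
      rcases List.mem_append.mp hc' with hc' | hc'
      · exact hsub c hc'
      · simp at hc'; subst hc'; exact hxy
    · intro id
      simp only [PySem.Set.mem_add, List.mem_append, List.mem_singleton]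
      constructor
      · rintro (hid | rfl)
        · obtain ⟨c, hc', he⟩ := hmem id |>.mp hid
          exact ⟨c, Or.inl hc', he⟩
        · exact ⟨(x, y), Or.inr rfl, rfl⟩
      · rintro ⟨c, hc' | rfl, he⟩
        · exact Or.inl ((hmem id).mpr ⟨c, hc', he⟩)
        · exact Or.inr he
    · exact pv_cnt_insert (fun c => c.1) stA.rows s (x, y) h2
    · exact pv_cnt_insert (fun c => c.2) stA.cols s (x, y) h3
    · exact pv_cnt_insert (fun c => c.1 - c.2) stA.dales s (x, y) h4
    · exact pv_cnt_insert (fun c => c.1 + c.2) stA.hills s (x, y) h5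

theorem pvInv_phase1 (n : Int) (lamps : List (List Int))
    (hinj : PvInj n lamps) (hlen : ∀ l ∈ lamps, l.length = 2) :
    PvInv n lamps
      (lamps.foldl (pvAddLamp n)
        { lights := PySem.Set.empty, rows := PySem.Dict.empty, cols := PySem.Dict.empty,
          dales := PySem.Dict.empty, hills := PySem.Dict.empty })
      (pvOnSet lamps) := by
  unfold pvOnSet
  suffices hgen : ∀ (ls : List (List Int)) (stA : PvStA) (s : PySem.Set (Int × Int)),
      (∀ l ∈ ls, l ∈ lamps) → (∀ l ∈ ls, l.length = 2) → PvInv n lamps stA s →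
      PvInv n lamps (ls.foldl (pvAddLamp n) stA)
        (ls.foldl (fun s l => match l with | [x, y] => PySem.Set.add s (x, y) | _ => s) s) by
    exact hgen lamps _ _ (fun _ h => h) hlen (pvInv_empty n lamps)
  intro ls
  induction ls with
  | nil => exact fun _ _ _ _ h => h
  | cons l rest ih =>
    intro stA s hls hlen2 h
    have hrest := fun l' hl' => hls l' (List.mem_cons_of_mem l hl')
    have hrlen := fun l' hl' => hlen2 l' (List.mem_cons_of_mem l hl')
    match l with
    | [x, y] =>
      exact ih _ _ hrest hrlen
        (pvInv_add n lamps hinj stA s x y (hls [x, y] List.mem_cons_self) h)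
    | [] => exact absurd (hlen2 _ List.mem_cons_self) (by simp)
    | [_] => exact absurd (hlen2 _ List.mem_cons_self) (by simp)
    | (_ :: _ :: _ :: _) => exact absurd (hlen2 _ List.mem_cons_self) (by simp)

theorem pvInv_step (n : Int) (L qs0 : List (List Int))
    (hsafe : PvSafe n L qs0) (x y : Int) (hq : [x, y] ∈ qs0)
    (stA : PvStA) (s : PySem.Set (Int × Int)) (i j : Int)
    (hi : x - 1 ≤ i ∧ i < x + 2) (hj : y - 1 ≤ j ∧ j < y + 2)
    (h : PvInv n L stA s) : PvInv n L (pvDiscard n stA i j) (pvTurnOff n s i j) := by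
  obtain ⟨hnd, hsub, hmem, h2, h3, h4, h5⟩ := h
  unfold pvDiscard pvTurnOff
  by_cases hb : 0 ≤ i ∧ i < n ∧ 0 ≤ j ∧ j < n
  · -- any lamp in s whose id is the discarded cell's id IS that cell
    have hkey : ∀ c ∈ s, c.1 * n + c.2 = i * n + j → c = (i, j) := by
      intro c hc he
      have hcl := hsub c hc
      rcases hsafe [c.1, c.2] hcl with hgrid | hfar
      · simp only [List.getD] at hgrid
        obtain ⟨e1, e2⟩ := pv_id_inj n c.1 c.2 i j
          ⟨by simpa using hgrid.2.2.1, by simpa using hgrid.2.2.2⟩ ⟨hb.2.2.1, hb.2.2.2⟩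
          (by simpa using he)
        exact Prod.ext e1 e2
      · exfalso
        refine hfar [x, y] hq i ?_ j ?_ hb.1 hb.2.1 hb.2.2.1 hb.2.2.2 (by simpa using he)
        · rw [PySem.List.mem_pyRange_one]
          constructor <;> simp <;> omega
        · rw [PySem.List.mem_pyRange_one]
          constructor <;> simp <;> omega
    have hiff : (i * n + j) ∈ stA.lights ↔ (i, j) ∈ s := by
      rw [hmem]
      constructor
      · rintro ⟨c, hc, he⟩
        exact hkey c hc he.symm ▸ hc
      · intro hc
        exact ⟨(i, j), hc, rfl⟩
    rw [if_pos hb]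
    by_cases hin : (i, j) ∈ s
    · have hc : PySem.Set.contains stA.lights (i * n + j) = true := by
        simpa [PySem.Set.contains_iff] using hiff.mpr hin
      rw [if_pos ⟨hb.1, hb.2.1, hb.2.2.1, hb.2.2.2, hc⟩]
      refine ⟨PySem.Set.nodup_discard s (i, j) hnd, ?_, ?_, ?_, ?_, ?_, ?_⟩
      · intro c hc'
        exact hsub c ((PySem.Set.mem_discard _ _ _).mp hc').1
      · intro id
        simp only [PySem.Set.mem_discard]
        constructor
        · rintro ⟨hid, hne⟩
          obtain ⟨c, hc', he⟩ := (hmem id).mp hid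
          refine ⟨c, ⟨hc', fun hce => hne ?_⟩, he⟩
          rw [hce] at he
          simpa using he
        · rintro ⟨c, ⟨hc', hce⟩, he⟩
          refine ⟨(hmem id).mpr ⟨c, hc', he⟩, fun hid => hce ?_⟩
          exact hkey c hc' (by rw [← he, hid])
      · exact pv_cnt_discard (fun c => c.1) stA.rows s (i, j) hnd hin h2
      · exact pv_cnt_discard (fun c => c.2) stA.cols s (i, j) hnd hin h3
      · exact pv_cnt_discard (fun c => c.1 - c.2) stA.dales s (i, j) hnd hin h4
      · exact pv_cnt_discard (fun c => c.1 + c.2) stA.hills s (i, j) hnd hin h5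
    · have hc : ¬ ((i * n + j) ∈ stA.lights) := fun hm => hin (hiff.mp hm)
      rw [if_neg (fun hcond => hc ((PySem.Set.contains_iff _ _).mp hcond.2.2.2.2)),
        pv_discard_of_not_mem s (i, j) hin]
      exact ⟨hnd, hsub, hmem, h2, h3, h4, h5⟩
  · rw [if_neg (by tauto), if_neg hb]
    exact ⟨hnd, hsub, hmem, h2, h3, h4, h5⟩

-- A's four counter tests are B's single scan of the lamp set.
theorem pv_lit_eq (stA : PvStA) (s : PySem.Set (Int × Int)) (x y : Int)
    (h2 : ∀ k : Int, stA.rows.getD k 0 = (s.countP (fun c => c.1 == k) : Int))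
    (h3 : ∀ k : Int, stA.cols.getD k 0 = (s.countP (fun c => c.2 == k) : Int))
    (h4 : ∀ k : Int, stA.dales.getD k 0 = (s.countP (fun c => c.1 - c.2 == k) : Int))
    (h5 : ∀ k : Int, stA.hills.getD k 0 = (s.countP (fun c => c.1 + c.2 == k) : Int)) :
    (stA.rows.getD x 0 ≠ 0 ∨ stA.cols.getD y 0 ≠ 0 ∨
       stA.dales.getD (x - y) 0 ≠ 0 ∨ stA.hills.getD (x + y) 0 ≠ 0) ↔ pvHit s x y = true := by
  rw [h2, h3, h4, h5]
  have hcnt : ∀ p : Int × Int → Bool, ((s.countP p : Int) ≠ 0 ↔ ∃ c ∈ s, p c = true) := by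
    intro p
    rw [ne_eq, Int.natCast_eq_zero, List.countP_eq_zero]
    simp
  constructor
  · intro hd
    simp only [pvHit, List.any_eq_true, Bool.or_eq_true]
    refine hd.elim (fun h => ?_) (fun hd => hd.elim (fun h => ?_)
      (fun hd => hd.elim (fun h => ?_) (fun h => ?_))) <;>
      · obtain ⟨c, hc, hp⟩ := (hcnt _).mp h
        exact ⟨c, hc, by simp_all⟩
  · intro hb
    simp only [pvHit, List.any_eq_true, Bool.or_eq_true] at hb
    obtain ⟨c, hc, hp⟩ := hb
    refine hp.elim (fun hp => hp.elim (fun hp => hp.elim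
          (fun h => Or.inl ((hcnt _).mpr ⟨c, hc, by simp [h]⟩))
          (fun h => Or.inr (Or.inl ((hcnt _).mpr ⟨c, hc, by simp [h]⟩))))
        (fun h => Or.inr (Or.inr (Or.inl ((hcnt _).mpr ⟨c, hc, by simp [h]⟩)))))
      (fun h => Or.inr (Or.inr (Or.inr ((hcnt _).mpr ⟨c, hc, by simp [h]⟩))))

theorem pvInv_foldl2 (n : Int) (L qs0 : List (List Int))
    (hsafe : PvSafe n L qs0) (x y : Int) (hq : [x, y] ∈ qs0)
    (stA : PvStA) (s : PySem.Set (Int × Int)) (h : PvInv n L stA s) :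
    PvInv n L
      ((PySem.List.pyRange (x - 1) (x + 2) 1).foldl
        (fun st i => (PySem.List.pyRange (y - 1) (y + 2) 1).foldl
          (fun st2 j => pvDiscard n st2 i j) st) stA)
      ((PySem.List.pyRange (x - 1) (x + 2) 1).foldl
        (fun t i => (PySem.List.pyRange (y - 1) (y + 2) 1).foldl
          (fun t2 j => pvTurnOff n t2 i j) t) s) := by
  have houter : ∀ i ∈ PySem.List.pyRange (x - 1) (x + 2) 1, x - 1 ≤ i ∧ i < x + 2 :=
    fun i hi => PySem.List.mem_pyRange_one.mp hi
  revert houter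
  generalize PySem.List.pyRange (x - 1) (x + 2) 1 = outer
  intro houter
  induction outer generalizing stA s with
  | nil => exact h
  | cons i rest ih =>
    have hi := houter i List.mem_cons_self
    refine ih _ _ ?_ (fun i' hi' => houter i' (List.mem_cons_of_mem i hi'))
    have hinner : ∀ j ∈ PySem.List.pyRange (y - 1) (y + 2) 1, y - 1 ≤ j ∧ j < y + 2 :=
      fun j hj => PySem.List.mem_pyRange_one.mp hj
    revert hinner
    generalize PySem.List.pyRange (y - 1) (y + 2) 1 = inner
    intro hinner
    induction inner generalizing stA s with
    | nil => exact h
    | cons j irest iih =>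
      exact iih _ _
        (pvInv_step n L qs0 hsafe x y hq stA s i j hi
          (hinner j List.mem_cons_self) h)
        (fun j' hj' => hinner j' (List.mem_cons_of_mem j hj'))

theorem pvQueries_eq (n : Int) (L qs0 : List (List Int)) (hinj : PvInj n L)
    (hsafe : PvSafe n L qs0) (qs : List (List Int)) (hqs : ∀ q ∈ qs, q ∈ qs0)
    (stA : PvStA) (s : PySem.Set (Int × Int)) (h : PvInv n L stA s) :
    pvQueriesA n stA qs = pvQueriesB n s qs := by
  induction qs generalizing stA s with
  | nil => rfl
  | cons q rest ih =>
    have hrest := fun q' hq' => hqs q' (List.mem_cons_of_mem q hq')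
    match q with
    | [] => exact ih hrest _ _ h
    | [_] => exact ih hrest _ _ h
    | (_ :: _ :: _ :: _) => exact ih hrest _ _ h
    | [x, y] =>
      obtain ⟨hnd, hsub, hmem, h2, h3, h4, h5⟩ := h
      simp only [pvQueriesA, pvQueriesB]
      have hlit := pv_lit_eq stA s x y h2 h3 h4 h5
      congr 1
      · by_cases hl : pvHit s x y = true
        · rw [if_pos (hlit.mpr hl), if_pos hl]
        · rw [if_neg (fun hc => hl (hlit.mp hc)), if_neg hl]
      · exact ih hrest _ _
          (pvInv_foldl2 n L qs0 hsafe x y (hqs [x, y] List.mem_cons_self) stA s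
            ⟨hnd, hsub, hmem, h2, h3, h4, h5⟩)

-- ===== VERDICT =====
theorem gridIllumination_spec : Claim_equal_gridIllumination := by
  intro n lamps queries _ hpre
  obtain ⟨hlen, _, hinj, hsafe⟩ := hpre
  unfold Spec_gridIllumination gridIllumination gridIllumination_alt
  exact pvQueries_eq n lamps queries hinj hsafe queries (fun _ h => h) _ _
    (pvInv_phase1 n lamps hinj hlen)
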